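-- pv_equiv track=rewrite | github.com/zolars/LeetCode-Solution | 2105.给植物浇水-ii.py | minimumRefill
-- ===== SOURCE A (Python) =====
-- def minimumRefill(plants: list[int], capacityA: int, capacityB: int) -> int:
--     ans = 0
--     l, r = 0, len(plants) - 1
--     currentA, currentB = capacityA, capacityB
--     while l < r:
--         if currentA < plants[l]:
--             ans += 1
--             currentA = capacityA
--         currentA -= plants[l]
--
--         if currentB < plants[r]:
--             ans += 1
--             currentB = capacityB
--         currentB -= plants[r]
--         l += 1
--         r -= 1
--     if l == r and max(currentA, currentB) < plants[l]:
--         ans += 1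
--     return ans
-- ===== SOURCE B (Python) =====
-- def minimumRefill(plants: list[int], capacityA: int, capacityB: int) -> int:
--     n = len(plants)
--     m = n // 2
--     P = [0]
--     for p in plants:
--         P.append(P[-1] + p)
--     ans = 0
--     base = 0
--     for i in range(m):
--         if P[i + 1] > base + capacityA:
--             ans += 1
--             base = P[i]
--     curA = capacityA - P[m] + base
--     base = P[n]
--     for k in range(m):
--         i = n - 1 - k
--         if base - P[i] > capacityB:
--             ans += 1
--             base = P[i + 1]
--     curB = capacityB - base + P[n - m]
--     if n % 2 == 1 and max(curA, curB) < plants[m]: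
--         ans += 1
--     return ans
-- ===== Notes on version B (the rewrite author's own statement) =====
-- stated objective: alternative
-- what changed: B precomputes a prefix-sum array once and replaces A's water-level simulation entirely: each gardener's half is processed by a loop whose only state besides the refill count is the prefix sum at the last refill (refill iff P[i+1] > base + capacity), split into two independent half-passes joined by a middle-plant check.
import Mathlib
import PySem

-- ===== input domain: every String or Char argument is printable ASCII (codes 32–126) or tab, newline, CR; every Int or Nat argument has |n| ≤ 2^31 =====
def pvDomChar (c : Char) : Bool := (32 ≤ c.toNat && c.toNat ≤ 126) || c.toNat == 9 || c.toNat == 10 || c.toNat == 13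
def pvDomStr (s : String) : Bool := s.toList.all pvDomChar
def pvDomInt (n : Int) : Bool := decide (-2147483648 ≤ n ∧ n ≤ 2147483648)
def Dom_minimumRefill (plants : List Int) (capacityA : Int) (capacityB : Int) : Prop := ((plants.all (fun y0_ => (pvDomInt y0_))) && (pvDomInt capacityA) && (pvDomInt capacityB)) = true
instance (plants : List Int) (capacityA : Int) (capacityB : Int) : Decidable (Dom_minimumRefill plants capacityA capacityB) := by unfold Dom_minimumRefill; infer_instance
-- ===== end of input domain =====

-- B replaces A's two-pointer water-level simulation by a precomputed prefix-sum array and two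
-- independent half-passes whose only loop state is the prefix sum at the last refill (alternative
-- decomposition, same cost).

-- ===== PORT A =====
-- the while loop: fuel-bounded recursion over (l, r); fuel = plants.length + 1 always suffices,
-- so the fuel-0 branch is unreachable. Indices l, r stay within range, so pyGetD's default is never used.
def minimumRefillGo (plants : List Int) (capA capB : Int) : Nat → Int → Int → Int → Int → Int → Int
  | 0, _, _, ans, _, _ => ans
  | fuel+1, l, r, ans, curA, curB =>
    if l < r then
      let pl := PySem.List.pyGetD plants l 0
      let ans1 := if curA < pl then ans + 1 else ans
      let curA1 := (if curA < pl then capA else curA) - pl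
      let pr := PySem.List.pyGetD plants r 0
      let ans2 := if curB < pr then ans1 + 1 else ans1
      let curB1 := (if curB < pr then capB else curB) - pr
      minimumRefillGo plants capA capB fuel (l + 1) (r - 1) ans2 curA1 curB1
    else if l = r ∧ max curA curB < PySem.List.pyGetD plants l 0 then ans + 1 else ans

def minimumRefill (plants : List Int) (capacityA : Int) (capacityB : Int) : Int :=
  minimumRefillGo plants capacityA capacityB (plants.length + 1) 0 ((plants.length : Int) - 1) 0 capacityA capacityB

-- ===== PORT B =====
-- P = [0]; for p in plants: P.append(P[-1] + p)
def buildP (plants : List Int) : List Int :=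
  plants.foldl (fun acc p => acc ++ [PySem.List.pyGetD acc (-1) 0 + p]) [0]

-- for i in range(m): if P[i+1] > base + capacityA: ans += 1; base = P[i]
def fwdStep (P : List Int) (capA : Int) (s : Int × Int) (i : Int) : Int × Int :=
  if PySem.List.pyGetD P (i + 1) 0 > s.2 + capA then (s.1 + 1, PySem.List.pyGetD P i 0) else s

-- for k in range(m): i = n - 1 - k; if base - P[i] > capacityB: ans += 1; base = P[i+1]
def bwdStep (P : List Int) (n capB : Int) (s : Int × Int) (k : Int) : Int × Int :=
  let i := n - 1 - k
  if s.2 - PySem.List.pyGetD P i 0 > capB then (s.1 + 1, PySem.List.pyGetD P (i + 1) 0) else s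

def minimumRefill_alt (plants : List Int) (capacityA : Int) (capacityB : Int) : Int :=
  let n := plants.length
  let m := n / 2
  let P := buildP plants
  let fa := (PySem.List.pyRange 0 (m : Int) 1).foldl (fwdStep P capacityA) (0, 0)
  let curA := capacityA - PySem.List.pyGetD P (m : Int) 0 + fa.2
  let fb := (PySem.List.pyRange 0 (m : Int) 1).foldl (bwdStep P (n : Int) capacityB)
      (0, PySem.List.pyGetD P (n : Int) 0)
  let curB := capacityB - fb.2 + PySem.List.pyGetD P ((n : Int) - (m : Int)) 0
  let ans := fa.1 + fb.1
  if n % 2 = 1 ∧ max curA curB < PySem.List.pyGetD plants ((m : Nat) : Int) 0 then ans + 1 else ans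

-- ===== PRECONDITION & SPEC =====
def Spec_minimumRefill (plants : List Int) (capacityA : Int) (capacityB : Int) (out : Int) : Prop := out = minimumRefill_alt plants capacityA capacityB
instance (plants : List Int) (capacityA : Int) (capacityB : Int) (out : Int) : Decidable (Spec_minimumRefill plants capacityA capacityB out) := by unfold Spec_minimumRefill; infer_instance

-- ===== CLAIM (what is proved, stated in full; the proofs are below) =====
def Claim_equal_minimumRefill : Prop := ∀ (plants : List Int) (capacityA : Int) (capacityB : Int), Dom_minimumRefill plants capacityA capacityB → Spec_minimumRefill plants capacityA capacityB (minimumRefill plants capacityA capacityB)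

-- ===== LEMMAS AND PROOFS =====

-- proof-side semantics of one greedy watering step and a one-sided pass (count from 0, can `cur`)
def waterStep (cap : Int) (acc : Int × Int) (p : Int) : Int × Int :=
  if acc.2 < p then (acc.1 + 1, cap - p) else (acc.1, acc.2 - p)

def wf (cap cur : Int) (ps : List Int) : Int × Int := ps.foldl (waterStep cap) (0, cur)

theorem wf_nil (cap cur : Int) : wf cap cur [] = (0, cur) := rfl

theorem wf_shift (cap : Int) (ps : List Int) : ∀ (a cur : Int),
    ps.foldl (waterStep cap) (a, cur) = (a + (wf cap cur ps).1, (wf cap cur ps).2) := by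
  induction ps with
  | nil => intro a cur; simp [wf]
  | cons p t ih =>
    intro a cur
    simp only [wf, List.foldl_cons, waterStep]
    by_cases h : cur < p <;> simp only [h, if_true, if_false, ite_true, ite_false] <;>
      rw [ih, ih] <;> simp <;> ring

theorem wf_cons (cap cur p : Int) (t : List Int) :
    wf cap cur (p :: t) =
      if cur < p then ((wf cap (cap - p) t).1 + 1, (wf cap (cap - p) t).2)
      else wf cap (cur - p) t := by
  by_cases h : cur < p
  · rw [if_pos h]
    show List.foldl (waterStep cap) (waterStep cap (0, cur) p) t = _
    rw [show waterStep cap (0, cur) p = (0 + 1, cap - p) from by simp [waterStep, h]]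
    rw [wf_shift]
    rw [show (0 : Int) + 1 + (wf cap (cap - p) t).1 = (wf cap (cap - p) t).1 + 1 from by ring]
  · rw [if_neg h]
    show List.foldl (waterStep cap) (waterStep cap (0, cur) p) t = _
    rw [show waterStep cap (0, cur) p = (0, cur - p) from by simp [waterStep, h]]
    rfl

theorem wf_snoc (cap cur p : Int) (xs : List Int) :
    wf cap cur (xs ++ [p]) =
      if (wf cap cur xs).2 < p then ((wf cap cur xs).1 + 1, cap - p)
      else ((wf cap cur xs).1, (wf cap cur xs).2 - p) := by
  simp only [wf, List.foldl_append, List.foldl_cons, List.foldl_nil, waterStep]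

-- A's loop equals the two one-sided passes plus middle check (on wf semantics)
theorem go_eq (plants : List Int) (capA capB : Int) :
    ∀ (fuel k : Nat) (ans curA curB : Int),
      k ≤ plants.length / 2 → plants.length / 2 - k < fuel →
      minimumRefillGo plants capA capB fuel (k : Int) ((plants.length : Int) - 1 - (k : Int)) ans curA curB =
        ans + (wf capA curA ((plants.drop k).take (plants.length / 2 - k))).1
            + (wf capB curB (((plants.drop (plants.length - plants.length / 2)).take (plants.length / 2 - k)).reverse)).1
            + (if plants.length % 2 = 1 ∧
                 max (wf capA curA ((plants.drop k).take (plants.length / 2 - k))).2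
                     (wf capB curB (((plants.drop (plants.length - plants.length / 2)).take (plants.length / 2 - k)).reverse)).2
                 < PySem.List.pyGetD plants ((plants.length / 2 : Nat) : Int) 0
               then 1 else 0) := by
  intro fuel
  induction fuel with
  | zero => intro k ans curA curB hk hf; omega
  | succ fuel ih =>
    intro k ans curA curB hk hf
    set n := plants.length with hn
    set m := n / 2 with hm
    by_cases hkm : k < m
    · have hln : k < n := by omega
      have hrn : n - 1 - k < n := by omega
      have hcond : (k : Int) < (n : Int) - 1 - (k : Int) := by omega
      rw [minimumRefillGo]
      simp only [hcond, if_true]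
      have hr : (n : Int) - 1 - (k : Int) = ((n - 1 - k : Nat) : Int) := by omega
      have hpl : PySem.List.pyGetD plants (k : Int) 0 = plants[k] := by
        rw [PySem.List.pyGetD_natCast]; simp [List.getD, List.getElem?_eq_getElem hln]
      have hpr : PySem.List.pyGetD plants ((n : Int) - 1 - (k : Int)) 0 = plants[n - 1 - k] := by
        rw [hr, PySem.List.pyGetD_natCast]; simp [List.getD, List.getElem?_eq_getElem hrn]
      have hl1 : (k : Int) + 1 = ((k + 1 : Nat) : Int) := by push_cast; ring
      have hr1 : (n : Int) - 1 - (k : Int) - 1 = (n : Int) - 1 - ((k + 1 : Nat) : Int) := by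
        push_cast; ring
      rw [hpl, hpr, hl1, hr1, ih (k + 1) _ _ _ (by omega) (by omega)]
      have hfront : (plants.drop k).take (m - k) = plants[k] :: (plants.drop (k + 1)).take (m - (k + 1)) := by
        rw [List.drop_eq_getElem_cons hln]
        have : m - k = (m - (k + 1)) + 1 := by omega
        rw [this, List.take_succ_cons]
      have hback : ((plants.drop (n - m)).take (m - k)).reverse
          = plants[n - 1 - k] :: ((plants.drop (n - m)).take (m - (k + 1))).reverse := by
        have hlen : (plants.drop (n - m)).length = m := by simp [hn]; omega
        have hidx : m - (k + 1) < (plants.drop (n - m)).length := by omega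
        have hstep : m - k = (m - (k + 1)) + 1 := by omega
        rw [hstep, List.take_succ, List.getElem?_eq_getElem hidx]
        simp only [Option.toList_some, List.reverse_append, List.reverse_cons, List.reverse_nil,
          List.nil_append, List.cons_append, List.singleton_append]
        congr 1
        rw [List.getElem_drop]
        congr 1
        omega
      rw [hfront, hback, wf_cons, wf_cons]
      by_cases hA : curA < plants[k] <;> by_cases hB : curB < plants[n - 1 - k] <;>
        simp only [hA, hB, if_true, if_false, ite_true, ite_false] <;> split_ifs <;> omega
    · have hkm' : k = m := by omega
      subst hkm'
      have hcond : ¬ ((m : Int) < (n : Int) - 1 - (m : Int)) := by omega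
      rw [minimumRefillGo, if_neg hcond]
      simp only [Nat.sub_self, List.take_zero, List.reverse_nil, wf_nil]
      by_cases hodd : n % 2 = 1
      · have hmr : (m : Int) = (n : Int) - 1 - (m : Int) := by omega
        rw [← hmr]
        by_cases hlt : max curA curB < PySem.List.pyGetD plants ((m : Nat) : Int) 0
        · rw [if_pos ⟨rfl, hlt⟩, if_pos ⟨hodd, hlt⟩]; omega
        · rw [if_neg (fun h => hlt h.2), if_neg (fun h => hlt h.2)]; omega
      · have hmr : ¬ ((m : Int) = (n : Int) - 1 - (m : Int)) := by omega
        rw [if_neg (fun h => hmr h.1), if_neg (fun h => hodd h.1)]; omega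

-- characterisation of buildP: tail of prefix sums from c
def gg (c : Int) : List Int → List Int
  | [] => []
  | p :: t => (c + p) :: gg (c + p) t

theorem build_aux (xs : List Int) : ∀ (acc : List Int) (c : Int),
    PySem.List.pyGetD acc (-1) 0 = c →
    xs.foldl (fun acc p => acc ++ [PySem.List.pyGetD acc (-1) 0 + p]) acc = acc ++ gg c xs := by
  induction xs with
  | nil => intro acc c _; simp [gg]
  | cons p t ih =>
    intro acc c hc
    simp only [List.foldl_cons, hc, gg]
    rw [ih (acc ++ [c + p]) (c + p) (PySem.List.pyGetD_neg_one_append_singleton acc (c + p) 0)]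
    simp

theorem buildP_eq (plants : List Int) : buildP plants = 0 :: gg 0 plants := by
  have := build_aux plants [0] 0 (by decide)
  simpa [buildP] using this

theorem gg_getD (xs : List Int) : ∀ (c : Int) (i : Nat), i ≤ xs.length →
    (c :: gg c xs).getD i 0 = c + (xs.take i).sum := by
  induction xs with
  | nil =>
    intro c i hi
    have : i = 0 := by simpa using hi
    subst this; simp
  | cons p t ih =>
    intro c i hi
    cases i with
    | zero => simp
    | succ j =>
      have := ih (c + p) j (by simpa using hi)
      simp only [gg, List.getD_cons_succ] at this ⊢
      rw [this, List.take_succ_cons]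
      simp; ring

-- P-indexing: pyGetD (buildP plants) ↑i 0 = sum of the first i plants, for i ≤ n
theorem P_get (plants : List Int) (i : Nat) (hi : i ≤ plants.length) :
    PySem.List.pyGetD (buildP plants) ((i : Nat) : Int) 0 = ((plants.take i).sum) := by
  rw [buildP_eq, PySem.List.pyGetD_natCast]
  simpa using gg_getD plants 0 i hi

-- the forward prefix-sum loop equals the wf pass over the first m' plants
theorem fwd_eq (plants : List Int) (capA : Int) : ∀ (m' : Nat), m' ≤ plants.length / 2 →
    (PySem.List.pyRange 0 (m' : Int) 1).foldl (fwdStep (buildP plants) capA) (0, 0) =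
      ((wf capA capA (plants.take m')).1,
       (wf capA capA (plants.take m')).2 - capA + ((plants.take m').sum)) := by
  intro m'
  induction m' with
  | zero => intro _; simp [PySem.List.pyRange_zero_nat, wf_nil]
  | succ j ih =>
    intro hj
    have hjn : j < plants.length := by omega
    have hsplit : ((j : Nat) : Int) + 1 = (((j + 1 : Nat)) : Int) := by push_cast; ring
    rw [show ((j + 1 : Nat) : Int) = ((j : Nat) : Int) + 1 from by push_cast; ring,
      PySem.List.pyRange_one_succ_right (by positivity), List.foldl_append]
    rw [ih (by omega)]
    have htake : plants.take (j + 1) = plants.take j ++ [plants[j]] := by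
      rw [List.take_succ, List.getElem?_eq_getElem hjn]; rfl
    simp only [List.foldl_cons, List.foldl_nil, fwdStep]
    rw [hsplit, P_get plants (j+1) (by omega), P_get plants j (by omega)]
    rw [htake, wf_snoc]
    have hsumB : (plants.take j ++ [plants[j]]).sum = (plants.take j).sum + plants[j] := by
      rw [List.sum_append]; simp
    have hsumA : (plants.take (j+1)).sum = (plants.take j).sum + plants[j] := by
      rw [htake]; exact hsumB
    by_cases h : (wf capA capA (plants.take j)).2 < plants[j]
    · rw [if_pos (by omega), if_pos h]; simp; omega
    · rw [if_neg (by omega), if_neg h]; simp; omega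

-- the backward prefix-sum loop equals the wf pass over the reversed last k plants
theorem bwd_eq (plants : List Int) (capB : Int) : ∀ (k : Nat), k ≤ plants.length / 2 →
    (PySem.List.pyRange 0 (k : Int) 1).foldl (bwdStep (buildP plants) (plants.length : Int) capB)
        (0, PySem.List.pyGetD (buildP plants) ((plants.length : Nat) : Int) 0) =
      ((wf capB capB ((plants.drop (plants.length - k)).reverse)).1,
       capB + ((plants.take (plants.length - k)).sum)
         - (wf capB capB ((plants.drop (plants.length - k)).reverse)).2) := by
  intro k
  induction k with
  | zero =>
    intro _
    rw [P_get plants plants.length (le_refl _)]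
    simp [PySem.List.pyRange_zero_nat, wf_nil]
  | succ j ih =>
    intro hj
    set n := plants.length with hn
    have hin : n - 1 - j < n := by omega
    rw [show ((j + 1 : Nat) : Int) = ((j : Nat) : Int) + 1 from by push_cast; ring,
      PySem.List.pyRange_one_succ_right (by positivity), List.foldl_append]
    rw [ih (by omega)]
    simp only [List.foldl_cons, List.foldl_nil, bwdStep]
    have hi1 : (n : Int) - 1 - ((j : Nat) : Int) = (((n - 1 - j : Nat)) : Int) := by omega
    have hi2 : (((n - 1 - j : Nat)) : Int) + 1 = (((n - j : Nat)) : Int) := by omega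
    rw [hi1, hi2]
    rw [P_get plants (n - 1 - j) (by omega), P_get plants (n - j) (by omega)]
    have hdropstep : plants.drop (n - (j + 1)) = plants[n - 1 - j] :: plants.drop (n - j) := by
      have h0 : n - (j + 1) = n - 1 - j := by omega
      have h2 : n - 1 - j + 1 = n - j := by omega
      rw [h0, List.drop_eq_getElem_cons hin, h2]
    have hrev : (plants.drop (n - (j + 1))).reverse
        = (plants.drop (n - j)).reverse ++ [plants[n - 1 - j]] := by
      rw [hdropstep]; simp
    have htk : plants.take (n - j) = plants.take (n - 1 - j) ++ [plants[n - 1 - j]] := by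
      have hstep : n - j = (n - 1 - j) + 1 := by omega
      rw [hstep, List.take_succ, List.getElem?_eq_getElem hin]; rfl
    have hsum1 : (plants.take (n - j)).sum = (plants.take (n - 1 - j)).sum + plants[n - 1 - j] := by
      rw [htk, List.sum_append]; simp
    have hsum2 : n - (j + 1) = n - 1 - j := by omega
    rw [hrev, wf_snoc, hsum2]
    set w := wf capB capB ((plants.drop (n - j)).reverse) with hw
    by_cases h : w.2 < plants[n - 1 - j]
    · rw [if_pos (by omega), if_pos h]; simp; omega
    · rw [if_neg (by omega), if_neg h]; simp; omega

-- ===== VERDICT (by name: the statement is the Claim_ definition above) =====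
theorem minimumRefill_spec : Claim_equal_minimumRefill := by
  intro plants capacityA capacityB _
  have H := go_eq plants capacityA capacityB (plants.length + 1) 0 0 capacityA capacityB
      (by omega) (by omega)
  have hdrop : (plants.drop (plants.length - plants.length / 2)).take (plants.length / 2)
      = plants.drop (plants.length - plants.length / 2) := by
    apply List.take_of_length_le; simp; omega
  simp only [Nat.cast_zero, sub_zero, Nat.sub_zero, List.drop_zero, hdrop] at H
  unfold Spec_minimumRefill
  simp only [minimumRefill, minimumRefill_alt]
  rw [H]
  rw [fwd_eq plants capacityA (plants.length / 2) (le_refl _),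
      bwd_eq plants capacityB (plants.length / 2) (le_refl _)]
  rw [show ((plants.length : Nat) : Int) - ((plants.length / 2 : Nat) : Int)
        = (((plants.length - plants.length / 2 : Nat)) : Int) from by omega]
  rw [P_get plants (plants.length / 2) (by omega),
      P_get plants (plants.length - plants.length / 2) (by omega)]
  have htake : plants.take (plants.length / 2)
      = (plants.drop 0).take (plants.length / 2) := by simp
  split_ifs <;> omega
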